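-- pv_equiv track=rewrite | github.com/Traineau/python-algo | binary.py | binary_to_str
-- ===== SOURCE A (Python) =====
-- def binary_to_str(binary_value, number_of_displayed_bit):
--     bit_index = number_of_displayed_bit - 1
--     str_value = ''
--
--     while bit_index >= len(binary_value):
--         str_value += '0'
--         if (bit_index % 4 == 0):
--             str_value += ' '
--         bit_index -= 1
--
--     while bit_index >= 0:
--         str_value += str(binary_value[bit_index])
--         if(bit_index %4 == 0):
--             str_value += ' '
--         bit_index -= 1
--
--     return str_value
-- ===== SOURCE B (Python) =====
-- def binary_to_str(binary_value, number_of_displayed_bit):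
--     # Build the displayed cells MSB->LSB, then group them in chunks of 4
--     # measured from the right; one space is appended after every group.
--     cells = [('0' if i >= len(binary_value) else str(binary_value[i]))
--              for i in range(number_of_displayed_bit - 1, -1, -1)]
--     k = len(cells) % 4
--     groups = []
--     if k != 0:
--         groups.append(''.join(cells[:k]) + ' ')
--     for j in range(k, len(cells), 4):
--         groups.append(''.join(cells[j:j + 4]) + ' ')
--     return ''.join(groups)
-- ===== Notes on version B (the rewrite author's own statement) =====
-- stated objective: faster
-- what changed: A walks the bit indices one by one, growing the result with repeated string += and an index%4 test per bit; B builds the MSB-to-LSB cell list once, regroups it into right-aligned chunks of 4 (with a possibly shorter leading group), and joins each group with one trailing space via ''.join.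
import Mathlib
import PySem

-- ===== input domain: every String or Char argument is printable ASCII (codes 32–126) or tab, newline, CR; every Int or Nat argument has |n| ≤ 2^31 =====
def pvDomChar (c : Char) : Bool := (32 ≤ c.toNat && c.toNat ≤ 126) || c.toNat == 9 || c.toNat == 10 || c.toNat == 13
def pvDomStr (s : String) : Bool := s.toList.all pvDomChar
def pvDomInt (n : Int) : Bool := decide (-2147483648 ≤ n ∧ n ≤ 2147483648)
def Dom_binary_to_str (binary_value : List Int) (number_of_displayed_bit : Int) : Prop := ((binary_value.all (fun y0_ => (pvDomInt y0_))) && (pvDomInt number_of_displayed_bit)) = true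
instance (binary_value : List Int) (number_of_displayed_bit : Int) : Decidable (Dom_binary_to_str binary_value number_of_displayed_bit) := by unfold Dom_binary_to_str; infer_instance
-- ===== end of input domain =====

-- B builds the MSB->LSB cell list once and regroups it into right-aligned chunks of 4
-- with one space appended per group, instead of A's per-index `% 4` test (alternative decomposition).


-- ===== PORT A =====
-- second while loop: while bit_index >= 0: append str(binary_value[bit_index]) (+ ' ' if %4==0)
def pvALoop2 (bv : List Int) (i : Int) (s : String) : String :=
  if _h : 0 ≤ i then
    pvALoop2 bv (i - 1)
      (s ++ PySem.Int.toStr (PySem.List.pyGetD bv i 0) ++ (if PySem.Int.mod i 4 = 0 then " " else ""))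
  else s
termination_by (i + 1).toNat
decreasing_by omega

-- first while loop: while bit_index >= len(binary_value): append '0' (+ ' ' if %4==0)
def pvALoop1 (bv : List Int) (i : Int) (s : String) : String :=
  if _h : (bv.length : Int) ≤ i then
    pvALoop1 bv (i - 1) (s ++ "0" ++ (if PySem.Int.mod i 4 = 0 then " " else ""))
  else pvALoop2 bv i s
termination_by (i + 1 - bv.length).toNat
decreasing_by simp; omega

def binary_to_str (binary_value : List Int) (number_of_displayed_bit : Int) : String :=
  pvALoop1 binary_value (number_of_displayed_bit - 1) ""

-- ===== PORT B =====
-- cells = [('0' if i >= len(bv) else str(bv[i])) for i in range(n-1, -1, -1)]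
def pvCells (bv : List Int) (n : Int) : List String :=
  (PySem.List.pyRange (n - 1) (-1) (-1)).map
    (fun i => if (bv.length : Int) ≤ i then "0" else PySem.Int.toStr (PySem.List.pyGetD bv i 0))

def binary_to_str_alt (binary_value : List Int) (number_of_displayed_bit : Int) : String :=
  let cells := pvCells binary_value number_of_displayed_bit
  let k : Nat := cells.length % 4
  let groups : List String :=
    (if k ≠ 0 then [PySem.Str.join "" (PySem.List.slice cells none (some (k : Int))) ++ " "] else [])
      ++ (PySem.List.pyRange (k : Int) (cells.length : Int) 4).map
          (fun j => PySem.Str.join "" (PySem.List.slice cells (some j) (some (j + 4))) ++ " ")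
  PySem.Str.join "" groups

-- ===== PRECONDITION & SPEC =====
def Spec_binary_to_str (binary_value : List Int) (number_of_displayed_bit : Int) (out : String) : Prop := out = binary_to_str_alt binary_value number_of_displayed_bit
instance (binary_value : List Int) (number_of_displayed_bit : Int) (out : String) : Decidable (Spec_binary_to_str binary_value number_of_displayed_bit out) := by unfold Spec_binary_to_str; infer_instance

-- ===== CLAIM (what is proved, stated in full; the proofs are below) =====
def Claim_equal_binary_to_str : Prop := ∀ (binary_value : List Int) (number_of_displayed_bit : Int), Dom_binary_to_str binary_value number_of_displayed_bit → Spec_binary_to_str binary_value number_of_displayed_bit (binary_to_str binary_value number_of_displayed_bit)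

-- ===== LEMMAS AND PROOFS =====

-- one displayed cell together with its (possibly empty) trailing space
def pvPiece (bv : List Int) (i : Int) : String :=
  (if (bv.length : Int) ≤ i then "0" else PySem.Int.toStr (PySem.List.pyGetD bv i 0))
    ++ (if PySem.Int.mod i 4 = 0 then " " else "")

-- canonical form: all pieces for indices i, i-1, …, 0 concatenated
def pvCanon (bv : List Int) (i : Int) : String :=
  PySem.Str.join "" ((PySem.List.pyRange i (-1) (-1)).map (pvPiece bv))

lemma pvSJ_nil : PySem.Str.join "" ([] : List String) = "" := rfl

lemma pvSJ_cons (x : String) (xs : List String) :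
    PySem.Str.join "" (x :: xs) = x ++ PySem.Str.join "" xs := by
  cases xs with
  | nil => simp [PySem.Str.join, PySem.Chars.join_singleton]
  | cons y ys => simp [PySem.Str.join, PySem.Chars.join_cons_cons]

lemma pvSJ_append (xs ys : List String) :
    PySem.Str.join "" (xs ++ ys) = PySem.Str.join "" xs ++ PySem.Str.join "" ys := by
  induction xs with
  | nil => simp [pvSJ_nil, String.empty_append]
  | cons x t ih => simp [pvSJ_cons, ih, String.append_assoc]

lemma pvCanon_cons (bv : List Int) (i : Int) (h : 0 ≤ i) :
    pvCanon bv i = pvPiece bv i ++ pvCanon bv (i - 1) := by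
  unfold pvCanon
  rw [PySem.List.pyRange_neg_one_cons (by omega : (-1 : Int) < i)]
  simp [pvSJ_cons]

lemma pvCanon_neg (bv : List Int) (i : Int) (h : i ≤ -1) : pvCanon bv i = "" := by
  unfold pvCanon
  rw [PySem.List.pyRange_neg_one_eq_nil h]
  rfl

lemma pvALoop2_eq (bv : List Int) (i : Int) (s : String) :
    i < (bv.length : Int) → pvALoop2 bv i s = s ++ pvCanon bv i := by
  induction i, s using pvALoop2.induct bv with
  | case1 i s h ih =>
      intro hlt
      rw [pvALoop2, dif_pos h]
      simp only [dite_eq_ite] at ih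
      rw [ih (by omega), pvCanon_cons bv i h]
      simp [pvPiece, if_neg (not_le.mpr hlt), String.append_assoc]
  | case2 i s h =>
      intro _
      rw [pvALoop2, dif_neg h, pvCanon_neg bv i (by omega), String.append_empty]

lemma pvALoop1_eq (bv : List Int) (i : Int) (s : String) :
    pvALoop1 bv i s = s ++ pvCanon bv i := by
  induction i, s using pvALoop1.induct bv with
  | case1 i s h ih =>
      rw [pvALoop1, dif_pos h]
      simp only [dite_eq_ite] at ih
      rw [ih, pvCanon_cons bv i (le_trans (Int.natCast_nonneg _) h)]
      simp [pvPiece, if_pos h, String.append_assoc]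
  | case2 i s h =>
      rw [pvALoop1, dif_neg h]
      exact pvALoop2_eq bv i s (by omega)

-- the generic regrouping fact: joining right-aligned 4-chunks (with a short leading
-- group) of a list of length k+4q, a space after each group, equals joining the
-- elements each followed by a space exactly at positions p with (len-1-p) % 4 = 0.
lemma pvRange4 (k q : Nat) :
    PySem.List.pyRange (k : Int) ((k + 4 * q : Nat) : Int) 4
      = (List.range q).map (fun j => ((k + 4 * j : Nat) : Int)) := by
  rw [PySem.List.pyRange_of_pos _ _ (by norm_num)]
  rcases Nat.eq_zero_or_pos q with hq | hq
  · subst hq; simp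
  · rw [if_pos (by push_cast; omega)]
    have : ((((k + 4 * q : Nat) : Int) - k + 4 - 1) / 4).toNat = q := by push_cast; omega
    rw [this]
    apply List.map_congr_left
    intro j hj; push_cast; ring

lemma pvSlice4 (L : List String) (a : Nat) :
    PySem.List.slice L (some ((a : Nat) : Int)) (some (((a : Nat) : Int) + 4)) = (L.drop a).take 4 := by
  have h : ((a : Nat) : Int) + 4 = ((a + 4 : Nat) : Int) := by push_cast; ring
  rw [h, PySem.List.slice_natCast]
  simp

lemma pvChunk (k q : Nat) (hk : k < 4) :
    ∀ L : List String, L.length = k + 4 * q →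
    PySem.Str.join ""
      ((if k ≠ 0 then [PySem.Str.join "" (PySem.List.slice L none (some (k : Int))) ++ " "] else [])
        ++ (PySem.List.pyRange (k : Int) ((k + 4 * q : Nat) : Int) 4).map
            (fun j => PySem.Str.join "" (PySem.List.slice L (some j) (some (j + 4))) ++ " "))
    = PySem.Str.join ""
        ((List.range (k + 4 * q)).map
          (fun p => (L[p]?.getD "") ++ (if (k + 4 * q - 1 - p) % 4 = 0 then " " else ""))) := by
  induction q with
  | zero =>
    intro L hL
    rw [pvRange4]
    simp only [List.range_zero, List.map_nil, List.append_nil]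
    interval_cases k
    · match L, hL with
      | [], _ => simp [pvSJ_nil]
    · match L, hL with
      | [a], _ =>
        rw [PySem.List.slice_to_natCast]
        simp [List.range_succ, pvSJ_cons, pvSJ_nil]
    · match L, hL with
      | [a,b], _ =>
        rw [PySem.List.slice_to_natCast]
        simp [List.range_succ, pvSJ_cons, pvSJ_nil, String.append_assoc]
    · match L, hL with
      | [a,b,c], _ =>
        rw [PySem.List.slice_to_natCast]
        simp [List.range_succ, pvSJ_cons, pvSJ_nil, String.append_assoc]
  | succ q ih =>
    intro L hL
    rw [show k + 4 * (q + 1) = k + 4 * q + 4 from by omega]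
    have hlen : L.length = k + 4 * q + 4 := by omega
    obtain ⟨t0, t1, t2, t3, hT⟩ : ∃ a b c d, L.drop (k + 4 * q) = [a, b, c, d] := by
      have h4 : (L.drop (k + 4 * q)).length = 4 := by simp [hlen]
      match L.drop (k + 4 * q), h4 with
      | [a,b,c,d], _ => exact ⟨a,b,c,d, rfl⟩
    have hP : (L.take (k + 4 * q)).length = k + 4 * q := by simp [hlen]
    have hr : PySem.List.pyRange (k : Int) ((k + 4 * q + 4 : Nat) : Int) 4
        = (List.range (q + 1)).map (fun j => ((k + 4 * j : Nat) : Int)) := by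
      rw [show k + 4 * q + 4 = k + 4 * (q + 1) from by omega]; exact pvRange4 k (q + 1)
    rw [hr, List.range_succ, List.map_append, List.map_append, ← List.append_assoc]
    have htail : List.map (fun j => PySem.Str.join "" (PySem.List.slice L (some j) (some (j + 4))) ++ " ")
        (List.map (fun j => ((k + 4 * j : Nat) : Int)) [q])
        = [PySem.Str.join "" [t0, t1, t2, t3] ++ " "] := by
      simp only [List.map_cons, List.map_nil]
      rw [pvSlice4 L (k + 4 * q), hT]
      rfl
    rw [htail]
    rw [List.range_add, List.map_append, pvSJ_append, pvSJ_append]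
    have htail2 : List.map (fun p => L[p]?.getD "" ++ if (k + 4 * q + 4 - 1 - p) % 4 = 0 then " " else "")
        (List.map (fun x => k + 4 * q + x) (List.range 4))
        = [t0 ++ "", t1 ++ "", t2 ++ "", t3 ++ " "] := by
      have hget : ∀ t : Nat, L[k + 4 * q + t]? = [t0, t1, t2, t3][t]? := by
        intro t; rw [← hT, List.getElem?_drop]
      simp only [List.range_succ, List.range_zero, List.map_cons, List.map_nil,
        List.nil_append, List.cons_append]
      rw [hget 0, hget 1, hget 2, hget 3]
      norm_num
      refine ⟨fun hc => absurd hc (by omega), fun hc => absurd hc (by omega)⟩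
    rw [htail2]
    have hlead : PySem.List.slice L none (some (k : Int))
        = PySem.List.slice (L.take (k + 4 * q)) none (some (k : Int)) := by
      rw [PySem.List.slice_to_natCast, PySem.List.slice_to_natCast, List.take_take,
          show min k (k + 4 * q) = k from by omega]
    have hgroups : List.map (fun j => PySem.Str.join "" (PySem.List.slice L (some j) (some (j + 4))) ++ " ")
          (List.map (fun j => ((k + 4 * j : Nat) : Int)) (List.range q))
        = List.map (fun j => PySem.Str.join "" (PySem.List.slice (L.take (k + 4 * q)) (some j) (some (j + 4))) ++ " ")
          (List.map (fun j => ((k + 4 * j : Nat) : Int)) (List.range q)) := by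
      rw [List.map_map, List.map_map]
      apply List.map_congr_left
      intro j hj
      have hj4 : k + 4 * j + 4 ≤ k + 4 * q := by
        have := List.mem_range.mp hj; omega
      simp only [Function.comp]
      rw [pvSlice4, pvSlice4, List.drop_take]
      congr 1
      rw [List.take_take, show min 4 (k + 4 * q - (k + 4 * j)) = 4 from by omega]
    have hbody : List.map (fun p => L[p]?.getD "" ++ if (k + 4 * q + 4 - 1 - p) % 4 = 0 then " " else "") (List.range (k + 4 * q))
        = List.map (fun p => (L.take (k + 4 * q))[p]?.getD "" ++ if (k + 4 * q - 1 - p) % 4 = 0 then " " else "") (List.range (k + 4 * q)) := by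
      apply List.map_congr_left
      intro p hp
      have hpm := List.mem_range.mp hp
      rw [List.getElem?_take_of_lt hpm, show k + 4 * q + 4 - 1 - p = (k + 4 * q - 1 - p) + 4 from by omega,
          Nat.add_mod_right]
    rw [hlead, hgroups, hbody, ← pvRange4 k q, ← pvSJ_append, ih (L.take (k + 4 * q)) hP, pvSJ_append]
    simp [pvSJ_cons, pvSJ_nil, String.append_assoc]

lemma pvAlt_eq (bv : List Int) (n : Int) :
    binary_to_str_alt bv n = pvCanon bv (n - 1) := by
  have hR : PySem.List.pyRange (n - 1) (-1) (-1)
      = (List.range n.toNat).map (fun p : Nat => n - 1 - (p : Int)) := by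
    rw [PySem.List.pyRange_neg_one, show n - 1 - -1 = n from by ring]
  unfold binary_to_str_alt pvCells
  rw [hR, List.map_map]
  simp only [List.length_map, List.length_range]
  have hchunk := pvChunk (n.toNat % 4) (n.toNat / 4) (by omega)
      ((List.range n.toNat).map
        ((fun i => if (bv.length : Int) ≤ i then "0" else PySem.Int.toStr (PySem.List.pyGetD bv i 0))
          ∘ (fun p : Nat => n - 1 - (p : Int))))
      (by simp; omega)
  rw [show n.toNat % 4 + 4 * (n.toNat / 4) = n.toNat from by omega] at hchunk
  rw [hchunk]
  unfold pvCanon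
  rw [hR, List.map_map]
  congr 1
  apply List.map_congr_left
  intro p hp
  have hpm := List.mem_range.mp hp
  have hget : ((List.range n.toNat).map
      ((fun i => if (bv.length : Int) ≤ i then "0" else PySem.Int.toStr (PySem.List.pyGetD bv i 0))
        ∘ (fun p : Nat => n - 1 - (p : Int))))[p]?.getD ""
      = (if (bv.length : Int) ≤ (n - 1 - (p : Int)) then "0" else PySem.Int.toStr (PySem.List.pyGetD bv (n - 1 - (p : Int)) 0)) := by
    simp [hpm, Function.comp]
  rw [hget]
  have hmod : PySem.Int.mod (n - 1 - (p : Int)) 4 = ((n.toNat - 1 - p) % 4 : Nat) := by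
    rw [show (n - 1 - (p : Int)) = ((n.toNat - 1 - p : Nat) : Int) from by omega]
    exact_mod_cast PySem.Int.mod_natCast _ 4
  simp only [Function.comp, pvPiece, hmod, Nat.cast_eq_zero]

-- ===== VERDICT (by name: the statement is the Claim_ definition above) =====
theorem binary_to_str_spec : Claim_equal_binary_to_str := by
  intro bv n _
  unfold Spec_binary_to_str binary_to_str
  rw [pvALoop1_eq, pvAlt_eq, String.empty_append]
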